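-- pv_equiv track=rewrite | github.com/rodrigodovalle/Jogo_Yahtzze_Rodrigo_Enzo | funcoes.py | calcula_pontos_regra_simples
-- ===== SOURCE A (Python) =====
-- def calcula_pontos_regra_simples(dados):
--     pontos = {}
--
--     for numero in range(1, 7):
--         soma = 0
--         for dado in dados:
--             if dado == numero:
--                 soma += dado
--         pontos[numero] = soma
--
--     return pontos
-- ===== SOURCE B (Python) =====
-- def calcula_pontos_regra_simples(dados):
--     pontos = {n: 0 for n in range(1, 7)}
--     for dado in dados:
--         if dado in pontos:
--             pontos[dado] += dado
--     return pontos
-- ===== Notes on version B (the rewrite author's own statement) =====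
-- stated objective: simpler
-- what changed: Replaces A's six full scans of the dice list (one per face in range(1,7)) with a single pass that pre-builds the zeroed dict for all six faces and accumulates into pontos[dado] under a membership guard.
import Mathlib
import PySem

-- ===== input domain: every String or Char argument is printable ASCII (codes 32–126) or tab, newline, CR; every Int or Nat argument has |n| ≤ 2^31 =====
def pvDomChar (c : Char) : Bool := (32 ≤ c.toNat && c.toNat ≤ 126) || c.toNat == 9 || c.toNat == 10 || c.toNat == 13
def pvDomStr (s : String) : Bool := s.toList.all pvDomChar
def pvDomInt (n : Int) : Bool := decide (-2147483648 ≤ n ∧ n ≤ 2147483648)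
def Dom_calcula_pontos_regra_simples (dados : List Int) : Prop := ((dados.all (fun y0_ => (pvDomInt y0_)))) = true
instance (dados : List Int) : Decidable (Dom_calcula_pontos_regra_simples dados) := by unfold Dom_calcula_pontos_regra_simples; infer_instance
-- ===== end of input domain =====

-- B builds the six-face dict zeroed up front and accumulates in ONE pass over the dice,
-- instead of A's per-face rescans of the whole list (objective: simpler).


-- ===== PORT A =====
-- A's inner loop: soma = 0; for dado in dados: if dado == numero: soma += dado
def pvSoma (numero : Int) (dados : List Int) : Int :=
  dados.foldl (fun soma dado => if dado == numero then soma + dado else soma) 0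

def calcula_pontos_regra_simples (dados : List Int) : List (Int × Int) :=
  ((PySem.List.pyRange 1 7 1).foldl (fun pontos numero =>
      pontos.insert numero (pvSoma numero dados))
    PySem.Dict.empty).items

-- ===== PORT B =====
-- B's loop body: if dado in pontos: pontos[dado] += dado
def pvStepB (pontos : PySem.Dict Int Int) (dado : Int) : PySem.Dict Int Int :=
  if pontos.contains dado then pontos.modify dado 0 (· + dado) else pontos

def calcula_pontos_regra_simples_alt (dados : List Int) : List (Int × Int) :=
  (dados.foldl pvStepB
    ((PySem.List.pyRange 1 7 1).foldl (fun pontos n => pontos.insert n 0) PySem.Dict.empty)).items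

-- ===== PRECONDITION & SPEC =====
def Spec_calcula_pontos_regra_simples (dados : List Int) (out : List (Int × Int)) : Prop := out = calcula_pontos_regra_simples_alt dados
instance (dados : List Int) (out : List (Int × Int)) : Decidable (Spec_calcula_pontos_regra_simples dados out) := by unfold Spec_calcula_pontos_regra_simples; infer_instance

-- ===== CLAIM (what is proved, stated in full; the proofs are below) =====
def Claim_equal_calcula_pontos_regra_simples : Prop := ∀ (dados : List Int), Dom_calcula_pontos_regra_simples dados → Spec_calcula_pontos_regra_simples dados (calcula_pontos_regra_simples dados)

-- ===== LEMMAS AND PROOFS =====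

lemma pvSoma_shift (n : Int) (xs : List Int) : ∀ (s : Int),
    xs.foldl (fun soma dado => if dado == n then soma + dado else soma) s =
      s + xs.foldl (fun soma dado => if dado == n then soma + dado else soma) 0 := by
  induction xs with
  | nil => intro s; simp
  | cons x xs ih =>
    intro s
    rw [List.foldl_cons, List.foldl_cons, ih (if x == n then s + x else s),
      ih (if x == n then 0 + x else 0)]
    split_ifs <;> ring

lemma pvSoma_cons (n x : Int) (xs : List Int) :
    pvSoma n (x :: xs) = (if x == n then x else 0) + pvSoma n xs := by
  rw [pvSoma, List.foldl_cons]
  show List.foldl _ (if x == n then 0 + x else 0) xs = _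
  rw [pvSoma_shift]
  split_ifs <;> simp [pvSoma]

lemma pvA_eq (dados : List Int) :
    calcula_pontos_regra_simples dados =
      [(1, pvSoma 1 dados), (2, pvSoma 2 dados), (3, pvSoma 3 dados),
       (4, pvSoma 4 dados), (5, pvSoma 5 dados), (6, pvSoma 6 dados)] := rfl

lemma pvStepB_hit (a b c d e f x : Int) (hx : x ∈ ([1, 2, 3, 4, 5, 6] : List Int)) :
    pvStepB (PySem.Dict.mk [(1, a), (2, b), (3, c), (4, d), (5, e), (6, f)]) x =
      PySem.Dict.mk [(1, if x == 1 then a + x else a), (2, if x == 2 then b + x else b),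
        (3, if x == 3 then c + x else c), (4, if x == 4 then d + x else d),
        (5, if x == 5 then e + x else e), (6, if x == 6 then f + x else f)] := by
  fin_cases hx <;>
    simp [pvStepB, PySem.Dict.contains, PySem.Dict.modify, PySem.Dict.getD, PySem.Dict.get?,
      PySem.Dict.insert]

lemma pvStepB_miss (a b c d e f x : Int) (hx : x ∉ ([1, 2, 3, 4, 5, 6] : List Int)) :
    pvStepB (PySem.Dict.mk [(1, a), (2, b), (3, c), (4, d), (5, e), (6, f)]) x =
      PySem.Dict.mk [(1, a), (2, b), (3, c), (4, d), (5, e), (6, f)] := by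
  simp only [List.mem_cons, List.not_mem_nil, or_false, not_or] at hx
  obtain ⟨h1, h2, h3, h4, h5, h6⟩ := hx
  rw [pvStepB, if_neg]
  simp [PySem.Dict.contains, Ne.symm h1, Ne.symm h2, Ne.symm h3, Ne.symm h4, Ne.symm h5,
    Ne.symm h6]

lemma pvB_fold (dados : List Int) : ∀ (a b c d e f : Int),
    (dados.foldl pvStepB
      (PySem.Dict.mk [(1, a), (2, b), (3, c), (4, d), (5, e), (6, f)])).items =
    [(1, a + pvSoma 1 dados), (2, b + pvSoma 2 dados), (3, c + pvSoma 3 dados),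
     (4, d + pvSoma 4 dados), (5, e + pvSoma 5 dados), (6, f + pvSoma 6 dados)] := by
  induction dados with
  | nil => intro a b c d e f; simp [pvSoma]
  | cons x xs ih =>
    intro a b c d e f
    rw [List.foldl_cons]
    by_cases hx : x ∈ ([1, 2, 3, 4, 5, 6] : List Int)
    · rw [pvStepB_hit a b c d e f x hx, ih]
      simp only [pvSoma_cons]
      split_ifs <;> simp_all <;> ring_nf
    · rw [pvStepB_miss a b c d e f x hx, ih]
      simp only [List.mem_cons, List.not_mem_nil, or_false, not_or] at hx
      obtain ⟨h1, h2, h3, h4, h5, h6⟩ := hx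
      simp only [pvSoma_cons]
      simp [h1, h2, h3, h4, h5, h6]

-- ===== VERDICT (by name: the statement is the Claim_ definition above) =====
theorem calcula_pontos_regra_simples_spec : Claim_equal_calcula_pontos_regra_simples := by
  intro dados _
  show _ = _
  rw [pvA_eq]
  show _ = (dados.foldl pvStepB (PySem.Dict.mk [(1, 0), (2, 0), (3, 0), (4, 0), (5, 0), (6, 0)])).items
  rw [pvB_fold]
  norm_num
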